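-- pv_equiv track=rewrite | github.com/Jak-Szymanski/AlgOptym | genetic.py | group_tasks_by_machine
-- ===== SOURCE A (Python) =====
-- from collections import defaultdict, deque
--
-- def group_tasks_by_machine(job_data, num_machines):
--
--     # Create a dictionary to hold lists of tasks for each machine
--     machine_dict = defaultdict(list)
--
--     # Iterate over each job (row in job_data)
--     for job_index, job in enumerate(job_data):
--         # Iterate over each task in the job (columns in the row)
--         for task_index, (machine, processing_time) in enumerate(job):
--             # Append the (job index, task index) pair and processing time to the corresponding machine's list
--             machine_dict[machine].append(((job_index, task_index), processing_time))
--
--     # Convert the dictionary to a list of lists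
--     grouped_data = [[] for _ in range(num_machines)]
--
--     for machine, tasks in machine_dict.items():
--         grouped_data[machine] = tasks
--
--     return grouped_data
-- ===== SOURCE B (Python) =====
-- def group_tasks_by_machine(job_data, num_machines):
--     # Flatten to a (machine, task) event list, stable-sort it by machine, then cut the
--     # sorted list into maximal equal-machine runs and install each run as its bucket.
--     events = [(machine, ((job_index, task_index), processing_time))
--               for job_index, job in enumerate(job_data)
--               for task_index, (machine, processing_time) in enumerate(job)]
--     events.sort(key=lambda e: e[0])  # stable: per-machine traversal order is preserved
--     grouped_data = [[] for _ in range(num_machines)]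
--     i = 0
--     n = len(events)
--     while i < n:
--         machine = events[i][0]
--         run = []
--         while i < n and events[i][0] == machine:
--             run.append(events[i][1])
--             i += 1
--         grouped_data[machine] = run
--     return grouped_data
-- ===== Notes on version B (the rewrite author's own statement) =====
-- stated objective: alternative
-- what changed: B abandons A's scatter-into-a-defaultdict-then-copy scheme for sort-then-scan: it flattens the jobs into a (machine, task) event list, stable-sorts it by machine id, and cuts the sorted list into maximal equal-machine runs, installing each run as its bucket.
-- outside the precondition, e.g. on group_tasks_by_machine([[(1, 7), (-1, 5)]], 2): A returns [[], [((0, 1), 5)]], B returns [[], [((0, 0), 7)]]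
import Mathlib
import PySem

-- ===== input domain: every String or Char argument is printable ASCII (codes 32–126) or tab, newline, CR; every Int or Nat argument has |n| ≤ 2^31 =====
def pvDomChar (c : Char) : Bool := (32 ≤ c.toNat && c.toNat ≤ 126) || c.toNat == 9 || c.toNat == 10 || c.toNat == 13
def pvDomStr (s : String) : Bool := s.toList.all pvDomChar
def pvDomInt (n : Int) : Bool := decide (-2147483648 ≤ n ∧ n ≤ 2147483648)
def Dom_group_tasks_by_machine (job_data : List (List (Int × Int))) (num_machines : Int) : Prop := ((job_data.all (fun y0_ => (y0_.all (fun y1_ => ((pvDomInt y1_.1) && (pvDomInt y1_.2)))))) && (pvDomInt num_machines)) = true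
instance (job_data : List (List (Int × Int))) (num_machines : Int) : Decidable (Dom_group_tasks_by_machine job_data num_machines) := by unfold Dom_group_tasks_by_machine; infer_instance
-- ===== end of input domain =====

-- B replaces A's scatter-into-a-defaultdict-then-copy scheme by sort-then-scan: flatten to a
-- (machine, task) event list, stable-sort by machine, cut it into maximal equal-machine runs
-- and install each run as its bucket (objective: alternative, not faster).
-- ===== PORT A =====
def group_tasks_by_machine (job_data : List (List (Int × Int))) (num_machines : Int) : List (List ((Int × Int) × Int)) :=
  -- machine_dict = defaultdict(list); nested enumerate loops appending to machine_dict[machine]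
  let machine_dict : PySem.Dict Int (List ((Int × Int) × Int)) :=
    (PySem.List.enumerate job_data).foldl (fun d jp =>
      (PySem.List.enumerate jp.2).foldl (fun d tp =>
        d.modify tp.2.1 [] (fun v => v ++ [((jp.1, tp.1), tp.2.2)])) d)
      PySem.Dict.empty
  -- grouped_data = [[] for _ in range(num_machines)]
  let grouped0 : List (List ((Int × Int) × Int)) :=
    (PySem.List.pyRange 0 num_machines 1).map (fun _ => [])
  -- for machine, tasks in machine_dict.items(): grouped_data[machine] = tasks
  -- (pySetD is the total form of the item assignment; Pre_ keeps every machine index in range)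
  machine_dict.items.foldl (fun g mv => PySem.List.pySetD g mv.1 mv.2) grouped0

-- ===== PORT B =====
-- B's outer/inner while loops over the sorted events: the inner while collects the run of the
-- current machine id (takeWhile of the tail), the outer continues past it (dropWhile) and
-- installs the run with the item assignment grouped_data[machine] = run (pySetD, total form;
-- Pre_ keeps the index in range). Exact for the index-scanning loop pair.
def pvFillRuns {τ : Type} (s : List (Int × τ)) (g : List (List τ)) : List (List τ) :=
  match s with
  | [] => g
  | e :: rest =>
    pvFillRuns (rest.dropWhile (fun x => x.1 == e.1))
      (PySem.List.pySetD g e.1 (e.2 :: (rest.takeWhile (fun x => x.1 == e.1)).map (fun x => x.2)))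
termination_by s.length
decreasing_by
  have := List.length_dropWhile_le (fun x => x.1 == e.1) rest
  simp only [List.length_cons]
  omega

def group_tasks_by_machine_alt (job_data : List (List (Int × Int))) (num_machines : Int) : List (List ((Int × Int) × Int)) :=
  -- events = [(machine, ((j, t), p)) for j, job in enumerate(job_data) for t, (machine, p) in enumerate(job)]
  let events : List (Int × ((Int × Int) × Int)) :=
    (PySem.List.enumerate job_data).flatMap (fun jp =>
      (PySem.List.enumerate jp.2).map (fun tp => (tp.2.1, ((jp.1, tp.1), tp.2.2))))
  -- events.sort(key=lambda e: e[0])  (stable)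
  let sortedEvents := PySem.List.sorted events (fun e => e.1)
  -- grouped_data = [[] for _ in range(num_machines)]; then the run-scanning while loops
  pvFillRuns sortedEvents ((PySem.List.pyRange 0 num_machines 1).map (fun _ => []))

-- ===== PRECONDITION & SPEC =====
-- Pre_ excludes inputs with a machine id outside [0, num_machines): ids out of [-n, n) make A
-- (and B) raise IndexError, and negative in-range ids hit Python's index wraparound, where
-- which whole-bucket overwrite wins (dict insertion order in A, ascending id order in B) is an
-- accident of each implementation.
def Pre_group_tasks_by_machine (job_data : List (List (Int × Int))) (num_machines : Int) : Prop :=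
  ∀ job ∈ job_data, ∀ mp ∈ job, 0 ≤ mp.1 ∧ mp.1 < num_machines
instance (job_data : List (List (Int × Int))) (num_machines : Int) : Decidable (Pre_group_tasks_by_machine job_data num_machines) := by unfold Pre_group_tasks_by_machine; infer_instance

def pvWitness_group_tasks_by_machine : (List (List (Int × Int))) × Int :=
  ([[(0, 7), (2, 3)], [(1, 4)]], 3)

def Spec_group_tasks_by_machine (job_data : List (List (Int × Int))) (num_machines : Int) (out : List (List ((Int × Int) × Int))) : Prop := out = group_tasks_by_machine_alt job_data num_machines
instance (job_data : List (List (Int × Int))) (num_machines : Int) (out : List (List ((Int × Int) × Int))) : Decidable (Spec_group_tasks_by_machine job_data num_machines out) := by unfold Spec_group_tasks_by_machine; infer_instance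

-- ===== CLAIM (what is proved, stated in full; the proofs are below) =====
def Claim_equal_group_tasks_by_machine : Prop := ∀ (job_data : List (List (Int × Int))) (num_machines : Int), Dom_group_tasks_by_machine job_data num_machines → Pre_group_tasks_by_machine job_data num_machines → Spec_group_tasks_by_machine job_data num_machines (group_tasks_by_machine job_data num_machines)

-- ===== LEMMAS AND PROOFS =====

-- the flattened stream of events (machine, ((job_index, task_index), processing_time)), in traversal order
def pvEvents (job_data : List (List (Int × Int))) : List (Int × ((Int × Int) × Int)) :=
  (PySem.List.enumerate job_data).flatMap (fun jp =>
    (PySem.List.enumerate jp.2).map (fun tp => (tp.2.1, ((jp.1, tp.1), tp.2.2))))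

-- a nested foldl over enumerate-of-enumerate is the foldl over the flattened event stream
theorem pv_foldl_flatMap {α β σ : Type} (g : α → List β) (f : σ → β → σ) :
    ∀ (l : List α) (s : σ), (l.flatMap g).foldl f s = l.foldl (fun s a => (g a).foldl f s) s := by
  intro l
  induction l with
  | nil => intro s; rfl
  | cons a t ih => intro s; simp only [List.flatMap_cons, List.foldl_append, List.foldl_cons, ih]

theorem pv_nested_eq_events {σ : Type} (f : σ → (Int × ((Int × Int) × Int)) → σ)
    (job_data : List (List (Int × Int))) (s : σ) :
    (PySem.List.enumerate job_data).foldl (fun s jp =>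
      (PySem.List.enumerate jp.2).foldl (fun s tp => f s (tp.2.1, ((jp.1, tp.1), tp.2.2))) s) s
    = (pvEvents job_data).foldl f s := by
  rw [pvEvents, pv_foldl_flatMap]
  simp only [List.foldl_map]

-- every event's machine index is in range
theorem pv_events_mem (job_data : List (List (Int × Int))) (num_machines : Int)
    (hpre : Pre_group_tasks_by_machine job_data num_machines) :
    ∀ e ∈ pvEvents job_data, 0 ≤ e.1 ∧ e.1 < num_machines := by
  intro e he
  simp only [pvEvents, List.mem_flatMap, List.mem_map] at he
  obtain ⟨jp, hjp, tp, htp, rfl⟩ := he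
  have hjob : jp.2 ∈ job_data := by
    obtain ⟨k, hk, hp⟩ := (PySem.List.mem_enumerate_iff _ _ _).mp hjp
    subst hp; simp
  have hmp : tp.2 ∈ jp.2 := by
    obtain ⟨k, hk, hp⟩ := (PySem.List.mem_enumerate_iff _ _ _).mp htp
    subst hp; simp
  exact hpre _ hjob _ hmp

-- ===== stability of the stable sort under a single-key filter =====

theorem pv_mem_insertBy {α : Type} (b : α → α → Bool) (x : α) :
    ∀ (l : List α) (a : α), a ∈ PySem.List.insertBy b x l ↔ a = x ∨ a ∈ l := by
  intro l
  induction l with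
  | nil => intro a; simp [PySem.List.insertBy]
  | cons y ys ih =>
    intro a
    by_cases hb : b x y
    · simp [PySem.List.insertBy, hb]
    · simp [PySem.List.insertBy, hb, ih]
      tauto

theorem pv_pairwise_insertBy {α : Type} (key : α → Int) (x : α) :
    ∀ (l : List α), l.Pairwise (fun a b => key a ≤ key b) →
    (PySem.List.insertBy (fun a b => decide (key a < key b)) x l).Pairwise (fun a b => key a ≤ key b) := by
  intro l
  induction l with
  | nil => intro _; simp [PySem.List.insertBy]
  | cons y ys ih =>
    intro hp
    rw [List.pairwise_cons] at hp
    by_cases hb : key x < key y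
    · simp only [PySem.List.insertBy, decide_eq_true_eq, if_pos hb]
      refine List.Pairwise.cons ?_ (List.Pairwise.cons hp.1 hp.2)
      intro a ha
      rcases List.mem_cons.mp ha with rfl | h
      · omega
      · have := hp.1 a h; omega
    · simp only [PySem.List.insertBy, decide_eq_true_eq, if_neg hb]
      refine List.Pairwise.cons ?_ (ih hp.2)
      intro a ha
      rcases (pv_mem_insertBy _ _ _ _).mp ha with rfl | h
      · omega
      · exact hp.1 a h

theorem pv_filter_insertBy_neg {α : Type} (key : α → Int) (m : Int) (b : α → α → Bool) (x : α)
    (hx : ¬ key x = m) :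
    ∀ (l : List α),
    (PySem.List.insertBy b x l).filter (fun a => key a == m) = l.filter (fun a => key a == m) := by
  have hxb : (key x == m) = false := by simpa using hx
  intro l
  induction l with
  | nil => simp [PySem.List.insertBy, hxb]
  | cons y ys ih =>
    by_cases hb : b x y
    · simp [PySem.List.insertBy, hb, hxb]
    · simp only [PySem.List.insertBy, if_neg hb, List.filter_cons, ih]

theorem pv_filter_insertBy_pos {α : Type} (key : α → Int) (m : Int) (x : α)
    (hx : key x = m) :
    ∀ (l : List α), l.Pairwise (fun a b => key a ≤ key b) →
    (PySem.List.insertBy (fun a b => decide (key a < key b)) x l).filter (fun a => key a == m)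
      = l.filter (fun a => key a == m) ++ [x] := by
  have hxb : (key x == m) = true := by simpa using hx
  intro l
  induction l with
  | nil => simp [PySem.List.insertBy, hxb]
  | cons y ys ih =>
    intro hp
    rw [List.pairwise_cons] at hp
    by_cases hb : key x < key y
    · simp only [PySem.List.insertBy, decide_eq_true_eq, if_pos hb]
      have hye : ∀ a ∈ y :: ys, (key a == m) = false := by
        intro a ha
        rcases List.mem_cons.mp ha with rfl | h
        · simp; omega
        · have := hp.1 a h; simp; omega
      have h1 : (y :: ys).filter (fun a => key a == m) = [] :=
        List.filter_eq_nil_iff.mpr (by intro a ha; simpa using hye a ha)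
      simp [hxb, h1]
    · simp only [PySem.List.insertBy, decide_eq_true_eq, if_neg hb]
      rw [List.filter_cons, List.filter_cons, ih hp.2]
      by_cases hy : (key y == m) = true <;> simp [hy]

-- the insertion-sort fold keeps the accumulator key-sorted
theorem pv_pairwise_foldl_insert {α : Type} (key : α → Int) :
    ∀ (xs acc : List α), acc.Pairwise (fun a b => key a ≤ key b) →
    (xs.foldl (fun acc x => PySem.List.insertBy (fun a b => decide (key a < key b)) x acc) acc).Pairwise
      (fun a b => key a ≤ key b) := by
  intro xs
  induction xs with
  | nil => intro acc h; exact h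
  | cons x t ih => intro acc h; exact ih _ (pv_pairwise_insertBy key x acc h)

theorem pv_filter_foldl_insert {α : Type} (key : α → Int) (m : Int) :
    ∀ (xs acc : List α), acc.Pairwise (fun a b => key a ≤ key b) →
    (xs.foldl (fun acc x => PySem.List.insertBy (fun a b => decide (key a < key b)) x acc) acc).filter
        (fun a => key a == m)
      = acc.filter (fun a => key a == m) ++ xs.filter (fun a => key a == m) := by
  intro xs
  induction xs with
  | nil => intro acc _; simp
  | cons x t ih =>
    intro acc h
    rw [List.foldl_cons, ih _ (pv_pairwise_insertBy key x acc h), List.filter_cons]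
    by_cases hx : key x = m
    · rw [pv_filter_insertBy_pos key m x hx acc h]
      simp [hx]
    · rw [pv_filter_insertBy_neg key m _ x hx acc]
      have : (key x == m) = false := by simpa using hx
      simp [this]

-- stable sort commutes with filtering one key value
theorem pv_filter_sorted {α : Type} (key : α → Int) (m : Int) (xs : List α) :
    (PySem.List.sorted xs key).filter (fun a => key a == m) = xs.filter (fun a => key a == m) := by
  have h := pv_filter_foldl_insert key m xs [] (by simp)
  simpa [PySem.List.sorted] using h

theorem pv_sorted_pairwise' {α : Type} (key : α → Int) (xs : List α) :
    (PySem.List.sorted xs key).Pairwise (fun a b => key a ≤ key b) := by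
  have h := pv_pairwise_foldl_insert key xs [] (by simp)
  simpa [PySem.List.sorted] using h

theorem pv_mem_sorted' {α : Type} (key : α → Int) (xs : List α) (a : α) :
    a ∈ PySem.List.sorted xs key ↔ a ∈ xs := PySem.List.mem_sorted xs key false a

-- ===== the run-cutting scan =====

-- the list of (machine, run) pairs B's while loops produce, in ascending scan order
def pvRuns {τ : Type} : List (Int × τ) → List (Int × List τ)
  | [] => []
  | e :: rest =>
    (e.1, e.2 :: (rest.takeWhile (fun x => x.1 == e.1)).map (fun x => x.2)) ::
      pvRuns (rest.dropWhile (fun x => x.1 == e.1))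
termination_by s => s.length
decreasing_by
  have := List.length_dropWhile_le (fun x => x.1 == e.1) rest
  simp only [List.length_cons]
  omega

-- B's fill loop is the scatter of the runs
theorem pv_fillRuns_eq_scatter {τ : Type} :
    ∀ (s : List (Int × τ)) (g : List (List τ)),
    pvFillRuns s g = (pvRuns s).foldl (fun g mv => PySem.List.pySetD g mv.1 mv.2) g := by
  intro s
  induction s using pvRuns.induct with
  | case1 => intro g; simp [pvFillRuns, pvRuns]
  | case2 e rest ih =>
    intro g
    rw [pvFillRuns, pvRuns, List.foldl_cons, ih]

-- in a key-sorted list, everything the dropWhile keeps has a strictly larger key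
theorem pv_dropWhile_keys_gt {τ : Type} (e : Int × τ) (rest : List (Int × τ))
    (hp : ((e :: rest).Pairwise (fun a b : Int × τ => a.1 ≤ b.1))) :
    ∀ a ∈ rest.dropWhile (fun x => x.1 == e.1), e.1 < a.1 := by
  rw [List.pairwise_cons] at hp
  intro a ha
  have hsub : rest.dropWhile (fun x => x.1 == e.1) <:+ rest := List.dropWhile_suffix _
  match hd : rest.dropWhile (fun x => x.1 == e.1) with
  | [] => rw [hd] at ha; cases ha
  | h :: t =>
    rw [hd] at ha
    have hh : ¬ (h.1 == e.1) = true := by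
      have := List.head?_dropWhile_not (fun x => x.1 == e.1) rest
      rw [hd] at this
      simpa using this
    have hhe : e.1 < h.1 := by
      have hhm : h ∈ rest := hsub.subset (by rw [hd]; exact List.mem_cons_self)
      have := hp.1 h hhm
      simp at hh
      omega
    rcases List.mem_cons.mp ha with rfl | hat
    · exact hhe
    · have hpd : (rest.dropWhile (fun x => x.1 == e.1)).Pairwise (fun a b : Int × τ => a.1 ≤ b.1) :=
        hp.2.sublist (List.dropWhile_sublist _)
      rw [hd, List.pairwise_cons] at hpd
      have := hpd.1 a hat
      omega

-- every run key occurs as a key of the scanned list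
theorem pv_runs_keys_mem {τ : Type} :
    ∀ (s : List (Int × τ)) (m : Int), m ∈ (pvRuns s).map (fun r => r.1) → ∃ a ∈ s, a.1 = m := by
  intro s
  induction s using pvRuns.induct with
  | case1 => intro m hm; simp [pvRuns] at hm
  | case2 e rest ih =>
    intro m hm
    rw [pvRuns] at hm
    simp only [List.map_cons, List.mem_cons] at hm
    rcases hm with rfl | hm
    · exact ⟨e, List.mem_cons_self, rfl⟩
    · obtain ⟨a, ha, rfl⟩ := ih _ hm
      exact ⟨a, List.mem_cons_of_mem _ ((List.dropWhile_sublist _).subset ha), rfl⟩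

-- on a key-sorted list the run keys are distinct
theorem pv_runs_nodup {τ : Type} :
    ∀ (s : List (Int × τ)), s.Pairwise (fun a b : Int × τ => a.1 ≤ b.1) →
    ((pvRuns s).map (fun r => r.1)).Nodup := by
  intro s
  induction s using pvRuns.induct with
  | case1 => intro _; simp [pvRuns]
  | case2 e rest ih =>
    intro hp
    rw [pvRuns, List.map_cons, List.nodup_cons]
    constructor
    · intro hmem
      obtain ⟨a, ha, hae⟩ := pv_runs_keys_mem _ _ hmem
      have := pv_dropWhile_keys_gt e rest hp a ha
      omega
    · exact ih (hp.sublist ((List.dropWhile_sublist _).trans (List.sublist_cons_self _ _)))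

-- looking a machine up among the runs of a key-sorted list = filtering that list for it
theorem pv_runs_lookup {τ : Type} :
    ∀ (s : List (Int × τ)), s.Pairwise (fun a b : Int × τ => a.1 ≤ b.1) → ∀ (m : Int),
    (((pvRuns s).lookup m).getD []) = (s.filter (fun a => a.1 == m)).map (fun a => a.2) := by
  intro s
  induction s using pvRuns.induct with
  | case1 => intro _ m; simp [pvRuns]
  | case2 e rest ih =>
    intro hp m
    have hsplit : rest = rest.takeWhile (fun x => x.1 == e.1) ++ rest.dropWhile (fun x => x.1 == e.1) :=
      (List.takeWhile_append_dropWhile).symm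
    have hdw0 : ∀ a ∈ rest.dropWhile (fun x => x.1 == e.1), e.1 < a.1 :=
      pv_dropWhile_keys_gt e rest hp
    by_cases hm : m = e.1
    · have hbm : (m == e.1) = true := by simpa using hm
      have hbe : (e.1 == m) = true := by simpa using hm.symm
      rw [pvRuns]
      simp only [List.lookup, hbm, Option.getD_some]
      have htw : (rest.takeWhile (fun x => x.1 == e.1)).filter (fun a => a.1 == m)
          = rest.takeWhile (fun x => x.1 == e.1) :=
        List.filter_eq_self.mpr (by
          intro a ha
          have := List.mem_takeWhile_imp ha
          simp at this ⊢
          omega)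
      have hdw : (rest.dropWhile (fun x => x.1 == e.1)).filter (fun a => a.1 == m) = [] :=
        List.filter_eq_nil_iff.mpr (by
          intro a ha
          have := hdw0 a ha
          simp
          omega)
      have hrw : rest.filter (fun a => a.1 == m) = rest.takeWhile (fun x => x.1 == e.1) := by
        conv_lhs => rw [hsplit]
        rw [List.filter_append, htw, hdw, List.append_nil]
      simp [hbe, hrw]
    · have hbm : (m == e.1) = false := by simpa using hm
      have hbe : (e.1 == m) = false := by simpa using fun h => hm h.symm
      rw [pvRuns]
      simp only [List.lookup, hbm]
      rw [ih (hp.sublist ((List.dropWhile_sublist _).trans (List.sublist_cons_self _ _))) m]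
      have htw : (rest.takeWhile (fun x => x.1 == e.1)).filter (fun a => a.1 == m) = [] :=
        List.filter_eq_nil_iff.mpr (by
          intro a ha
          have := List.mem_takeWhile_imp ha
          simp at this ⊢
          omega)
      have hrw : rest.filter (fun a => a.1 == m)
          = (rest.dropWhile (fun x => x.1 == e.1)).filter (fun a => a.1 == m) := by
        conv_lhs => rw [hsplit]
        rw [List.filter_append, htw, List.nil_append]
      simp [hbe, hrw]

-- ===== A-side: the scatter loop and the machine dict =====

-- A's scatter loop preserves length
theorem pv_scatter_length {τ : Type} (pairs : List (Int × τ)) :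
    ∀ (g : List τ), (pairs.foldl (fun g mv => PySem.List.pySetD g mv.1 mv.2) g).length = g.length := by
  intro g
  induction pairs generalizing g with
  | nil => rfl
  | cons p t ih => simp only [List.foldl_cons, ih, PySem.List.length_pySetD]

-- an absent key looks up to none
theorem pv_lookup_eq_none {τ : Type} (l : List (Int × τ)) (a : Int) (ha : a ∉ l.map (fun p => p.1)) :
    l.lookup a = none := by
  induction l with
  | nil => rfl
  | cons p t ih =>
    obtain ⟨k, v⟩ := p
    simp only [List.map_cons, List.mem_cons] at ha
    push Not at ha
    have hb : (a == k) = false := by simpa using ha.1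
    simp [List.lookup, hb, ih ha.2]

-- a scatter loop, element by element (keys distinct and in range)
theorem pv_scatter_getElem {τ : Type} (pairs : List (Int × τ)) :
    ∀ (g : List τ), (pairs.map (fun p => p.1)).Nodup →
    (∀ p ∈ pairs, 0 ≤ p.1 ∧ p.1 < (g.length : Int)) →
    ∀ (i : Nat) (hi : i < g.length),
      (pairs.foldl (fun g mv => PySem.List.pySetD g mv.1 mv.2) g)[i]? =
        some ((pairs.lookup (i : Int)).getD (g[i]'hi)) := by
  induction pairs with
  | nil => intro g _ _ i hi; simp [List.getElem?_eq_getElem hi]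
  | cons p t ih =>
    intro g hnd hin i hi
    obtain ⟨k, v⟩ := p
    obtain ⟨h0, h1⟩ := hin (k, v) List.mem_cons_self
    simp only [List.map_cons, List.nodup_cons] at hnd
    have hset : PySem.List.pySetD g k v = g.set k.toNat v :=
      PySem.List.pySetD_of_nonneg _ _ h0
    rw [List.foldl_cons, hset]
    have hlen : (g.set k.toNat v).length = g.length := by simp
    have ih' := ih (g.set k.toNat v) hnd.2
      (by intro p' hp'
          have := hin p' (List.mem_cons_of_mem _ hp')
          simpa [hlen] using this)
      i (by omega)
    rw [ih']
    by_cases hk : (i : Int) = k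
    · have hkn : k.toNat = i := by omega
      have hnone : t.lookup k = none :=
        pv_lookup_eq_none _ _ hnd.1
      simp [List.lookup, hnone, hk, hkn]
    · have hkn : ¬ (k.toNat = i) := by omega
      have hb : ((i : Int) == k) = false := by simpa using hk
      simp [List.lookup, hb, hkn]

-- Dict.get? on a dict is association-list lookup on its items
theorem pv_get?_eq_lookup {ν : Type} (l : List (Int × ν)) (k : Int) :
    (PySem.Dict.mk l).get? k = l.lookup k := by
  induction l with
  | nil => rfl
  | cons p t ih =>
    obtain ⟨k1, v1⟩ := p
    rw [PySem.Dict.get?_mk_cons]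
    by_cases hk : k = k1
    · simp [List.lookup, hk]
    · have hb : (k == k1) = false := by simpa using hk
      have hb' : (k1 == k) = false := by simpa using (Ne.symm hk)
      simp [List.lookup, hb, hb', ih]

-- the machine dict built by A's nested loop, as a fold over the event stream: its lookups
theorem pv_dict_getD (es : List (Int × ((Int × Int) × Int))) (m : Int) :
    ((es.foldl (fun d e => d.modify e.1 [] (fun v => v ++ [e.2])) PySem.Dict.empty).getD m []) =
      (es.filter (fun e => e.1 == m)).map (fun e => e.2) := by
  have := PySem.Dict.getD_foldl_modify_append (l := es) (d := PySem.Dict.empty) (c := m)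
  simpa using this

-- ===== VERDICT (by name: the statement is the Claim_ definition above) =====
theorem group_tasks_by_machine_spec : Claim_equal_group_tasks_by_machine := by
  intro jd n _ hpre
  unfold Spec_group_tasks_by_machine
  have hmem : ∀ e ∈ pvEvents jd, 0 ≤ e.1 ∧ e.1 < n := pv_events_mem jd n hpre
  have hAdict : ((PySem.List.enumerate jd).foldl (fun d jp =>
        (PySem.List.enumerate jp.2).foldl (fun d tp =>
          d.modify tp.2.1 [] (fun v => v ++ [((jp.1, tp.1), tp.2.2)])) d)
        (PySem.Dict.empty : PySem.Dict Int (List ((Int × Int) × Int))))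
      = (pvEvents jd).foldl (fun d e => d.modify e.1 [] (fun v => v ++ [e.2])) PySem.Dict.empty :=
    pv_nested_eq_events
      (fun d e => d.modify e.1 [] (fun v => v ++ [e.2])) jd PySem.Dict.empty
  have hA : group_tasks_by_machine jd n
      = ((PySem.List.enumerate jd).foldl (fun d jp =>
          (PySem.List.enumerate jp.2).foldl (fun d tp =>
            d.modify tp.2.1 [] (fun v => v ++ [((jp.1, tp.1), tp.2.2)])) d)
          (PySem.Dict.empty : PySem.Dict Int (List ((Int × Int) × Int)))).items.foldl
          (fun g mv => PySem.List.pySetD g mv.1 mv.2)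
          ((PySem.List.pyRange 0 n 1).map (fun _ => ([] : List ((Int × Int) × Int)))) := rfl
  have hB : group_tasks_by_machine_alt jd n
      = pvFillRuns (PySem.List.sorted (pvEvents jd) (fun e => e.1))
          ((PySem.List.pyRange 0 n 1).map (fun _ => ([] : List ((Int × Int) × Int)))) := rfl
  rw [hA, hAdict, hB]
  set es := pvEvents jd with hes
  set d := es.foldl (fun d e => d.modify e.1 [] (fun v => v ++ [e.2])) PySem.Dict.empty with hd
  set g0 := (PySem.List.pyRange 0 n 1).map (fun _ => ([] : List ((Int × Int) × Int))) with hg0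
  set s := PySem.List.sorted es (fun e => e.1) with hs
  have hsp : s.Pairwise (fun a b => a.1 ≤ b.1) := pv_sorted_pairwise' (fun e => e.1) es
  have hg0len : g0.length = n.toNat := by
    simp [hg0, PySem.List.length_pyRange_one]
  -- A-side bookkeeping
  have hkeys : d.keys = PySem.Set.ofList (es.map (fun e => e.1)) := by
    have h := PySem.Dict.keys_foldl_modify_key (l := es) (key := (fun e => e.1)) (d0 := [])
      (f := fun _ e v => v ++ [e.2]) (d := PySem.Dict.empty)
    simpa [PySem.Set.update, PySem.Set.ofList] using h
  have hnodup : d.keys.Nodup :=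
    PySem.Dict.nodup_keys_foldl_modify_key (l := es) (key := (fun e => e.1)) (d0 := [])
      (f := fun _ e v => v ++ [e.2]) (d := PySem.Dict.empty) (by simp)
  have hnodup' : (d.items.map (fun p => p.1)).Nodup := hnodup
  have hrange : ∀ p ∈ d.items, 0 ≤ p.1 ∧ p.1 < (g0.length : Int) := by
    intro p hp
    have hk : p.1 ∈ d.keys := List.mem_map_of_mem hp
    rw [hkeys] at hk
    have hk' : p.1 ∈ es.map (fun e => e.1) := (PySem.Set.mem_ofList _ _).mp hk
    obtain ⟨e, he, hpe⟩ := List.mem_map.mp hk'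
    have := hmem e he
    rw [hg0len]
    omega
  -- B-side bookkeeping
  have hrnodup : ((pvRuns s).map (fun r => r.1)).Nodup := pv_runs_nodup s hsp
  have hrrange : ∀ p ∈ pvRuns s, 0 ≤ p.1 ∧ p.1 < (g0.length : Int) := by
    intro p hp
    obtain ⟨a, ha, hae⟩ := pv_runs_keys_mem s p.1 (List.mem_map_of_mem hp)
    have ha' : a ∈ es := (pv_mem_sorted' (fun e => e.1) es a).mp ha
    have := hmem a ha'
    rw [hg0len]
    omega
  rw [pv_fillRuns_eq_scatter]
  apply List.ext_getElem?
  intro i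
  by_cases hi : i < g0.length
  · rw [pv_scatter_getElem d.items g0 hnodup' hrange i hi,
        pv_scatter_getElem (pvRuns s) g0 hrnodup hrrange i hi]
    have hg0i : g0[i]'hi = [] := by simp [hg0]
    have hlk : d.items.lookup (i : Int) = d.get? (i : Int) :=
      (pv_get?_eq_lookup d.items (i : Int)).symm
    have hgetD : (d.get? (i : Int)).getD [] = d.getD (i : Int) [] :=
      (PySem.Dict.getD_eq_get?_getD d (i : Int) []).symm
    rw [hg0i, hlk, hgetD, hd, pv_dict_getD, pv_runs_lookup s hsp (i : Int), hs,
        pv_filter_sorted (fun e => e.1) (i : Int) es]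
  · have hi' : g0.length ≤ i := Nat.le_of_not_lt hi
    rw [List.getElem?_eq_none (by rw [pv_scatter_length]; exact hi'),
        List.getElem?_eq_none (by rw [pv_scatter_length]; exact hi')]
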